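-- pv_equiv track=rewrite | github.com/baeckertv/Clifford-Pickover-Geheimdienst | isbn_tiefanalyse.py | finde_wiederholungen
-- ===== SOURCE A (Python) =====
-- def finde_wiederholungen(text):
--     """Findet wiederholte Ziffern"""
--     ziffern = [int(c) for c in text if c.isdigit()]
--     wiederholungen = []
--
--     i = 0
--     while i < len(ziffern):
--         count = 1
--         while i + count < len(ziffern) and ziffern[i] == ziffern[i + count]:
--             count += 1
--         if count >= 3:
--             wiederholungen.append((ziffern[i], count, i))
--         i += count
--
--     return wiederholungen
-- ===== SOURCE B (Python) =====
-- def finde_wiederholungen(text):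
--     """Findet wiederholte Ziffern"""
--     ziffern = [int(c) for c in text if c.isdigit()]
--     wiederholungen = []
--     run_digit = None
--     run_len = 0
--     start = 0
--     for idx, d in enumerate(ziffern):
--         if d == run_digit:
--             run_len += 1
--         else:
--             if run_len >= 3:
--                 wiederholungen.append((run_digit, run_len, start))
--             run_digit, run_len, start = d, 1, idx
--     if run_len >= 3:
--         wiederholungen.append((run_digit, run_len, start))
--     return wiederholungen
-- ===== Notes on version B (the rewrite author's own statement) =====
-- stated objective: alternative
-- what changed: Replaces A's nested index loops (inner while re-scanning each run, outer index jump) by a single forward pass over enumerate(ziffern) that maintains a running (digit, length, start) state and flushes it at each run boundary and at the end.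
import Mathlib
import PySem

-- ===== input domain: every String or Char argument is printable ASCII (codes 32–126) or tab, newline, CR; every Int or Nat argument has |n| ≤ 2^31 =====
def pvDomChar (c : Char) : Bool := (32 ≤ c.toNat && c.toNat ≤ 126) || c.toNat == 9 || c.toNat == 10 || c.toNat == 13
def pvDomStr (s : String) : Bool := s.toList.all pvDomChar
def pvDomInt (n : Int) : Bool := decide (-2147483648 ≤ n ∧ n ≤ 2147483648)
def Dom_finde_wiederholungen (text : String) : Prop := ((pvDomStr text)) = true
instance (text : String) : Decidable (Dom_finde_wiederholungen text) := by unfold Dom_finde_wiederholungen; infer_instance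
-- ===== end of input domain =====

-- B replaces A's nested index loops (inner while counting each run, outer index jump) by a
-- single forward pass keeping a running (digit, length, start) state; same O(n) cost (objective: alternative).

-- ===== PORT A =====
-- ziffern = [int(c) for c in text if c.isdigit()]  (int(c) = code point - 48, exact for digit chars)
def pvZiffern (text : String) : List Int :=
  (text.toList.filter (fun c => PySem.Chars.isdigit c)).map (fun c => ((c.toNat : Int) - 48))

-- inner while: count = 1; while i+count < len and ziffern[i] == ziffern[i+count]: count += 1
-- (fuel bounds the iterations: count grows each pass and the guard needs i+count < len,
--  so z.length steps always suffice; indices are only read under the guard, so getD is exact)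
def pvAInner (z : List Int) (i : Nat) : Nat → Nat → Nat
  | count, 0 => count
  | count, fuel + 1 =>
    if i + count < z.length ∧ z.getD i 0 = z.getD (i + count) 0 then
      pvAInner z i (count + 1) fuel
    else count

-- outer while over i, accumulating wiederholungen (fuel: i grows by count ≥ 1 each pass)
def pvAOuter (z : List Int) : Nat → List (Int × Int × Int) → Nat → List (Int × Int × Int)
  | _, acc, 0 => acc
  | i, acc, fuel + 1 =>
    if i < z.length then
      let count := pvAInner z i 1 z.length
      pvAOuter z (i + count)
        (if 3 ≤ count then acc ++ [(z.getD i 0, (count : Int), (i : Int))] else acc) fuel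
    else acc

def finde_wiederholungen (text : String) : List (Int × Int × Int) :=
  pvAOuter (pvZiffern text) 0 [] ((pvZiffern text).length + 1)

-- ===== PORT B =====
-- the twice-occurring "if run_len >= 3: wiederholungen.append((run_digit, run_len, start))"
def pvFlush (res : List (Int × Int × Int)) (rd : Option Int) (rl st : Int) :
    List (Int × Int × Int) :=
  if 3 ≤ rl then res ++ [(rd.getD 0, rl, st)] else res

-- for idx, d in enumerate(ziffern): …   with state (res, run_digit, run_len, start)
def pvBGo (z : List Int) (idx : Int) (res : List (Int × Int × Int)) (rd : Option Int)
    (rl st : Int) : List (Int × Int × Int) :=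
  match z with
  | [] => pvFlush res rd rl st
  | d :: rest =>
    if some d = rd then pvBGo rest (idx + 1) res rd (rl + 1) st
    else pvBGo rest (idx + 1) (pvFlush res rd rl st) (some d) 1 idx

def finde_wiederholungen_alt (text : String) : List (Int × Int × Int) :=
  pvBGo (pvZiffern text) 0 [] none 0 0

-- ===== PRECONDITION & SPEC =====
def Spec_finde_wiederholungen (text : String) (out : List (Int × Int × Int)) : Prop := out = finde_wiederholungen_alt text
instance (text : String) (out : List (Int × Int × Int)) : Decidable (Spec_finde_wiederholungen text out) := by unfold Spec_finde_wiederholungen; infer_instance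

-- ===== CLAIM (what is proved, stated in full; the proofs are below) =====
def Claim_equal_finde_wiederholungen : Prop := ∀ (text : String), Dom_finde_wiederholungen text → Spec_finde_wiederholungen text (finde_wiederholungen text)

-- ===== LEMMAS AND PROOFS =====

-- common characterisation: the runs of z, with absolute start offsets
def pvG (z : List Int) (off : Int) : List (Int × Int × Int) :=
  match z with
  | [] => []
  | d :: rest =>
    let k := 1 + (rest.takeWhile (fun x => x == d)).length
    (if 3 ≤ k then [(d, (k : Int), off)] else []) ++
      pvG (rest.dropWhile (fun x => x == d)) (off + (k : Int))
termination_by z.length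
decreasing_by have := (List.dropWhile_sublist (l := rest) (p := fun x => x == d)).length_le; simp; omega

theorem pv_dropWhile_eq_drop {α : Type} (p : α → Bool) (l : List α) :
    l.dropWhile p = l.drop (l.takeWhile p).length := by
  induction l with
  | nil => rfl
  | cons x r ih =>
    by_cases h : p x = true
    · simp [List.dropWhile, List.takeWhile, h, ih]
    · simp [List.dropWhile, List.takeWhile, h]

theorem pv_dropWhile_head {α : Type} (p : α → Bool) (l : List α) {d : α} {r : List α}
    (h : l.dropWhile p = d :: r) : p d = false := by
  induction l with
  | nil => simp [List.dropWhile] at h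
  | cons x t ih =>
    by_cases hx : p x = true
    · exact ih (by simpa [List.dropWhile, hx] using h)
    · simp [List.dropWhile, hx] at h
      simp [← h.1]; simpa using hx

theorem pvAInner_eq (z : List Int) (i : Nat) :
    ∀ fuel c, z.length ≤ i + c + fuel →
      pvAInner z i c fuel =
        c + ((z.drop (i + c)).takeWhile (fun x => x == z.getD i 0)).length := by
  intro fuel
  induction fuel with
  | zero =>
    intro c hf
    rw [pvAInner, List.drop_eq_nil_of_le (by omega)]
    simp
  | succ fuel ih =>
    intro c hf
    rw [pvAInner]
    by_cases h : i + c < z.length ∧ z.getD i 0 = z.getD (i + c) 0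
    · rw [if_pos h]
      have hdrop : z.drop (i + c) = z.getD (i + c) 0 :: z.drop (i + c + 1) := by
        rw [List.getD_eq_getElem z 0 h.1, List.drop_eq_getElem_cons h.1]
      rw [hdrop]
      simp only [List.takeWhile]
      have hb : (z.getD (i + c) 0 == z.getD i 0) = true := by
        simp only [beq_iff_eq]; exact h.2.symm
      rw [hb]
      have := ih (c + 1) (by omega)
      have harg : i + (c + 1) = i + c + 1 := by omega
      rw [harg] at this
      simp only [List.length_cons]
      omega
    · rw [if_neg h]
      rcases Decidable.em (i + c < z.length) with hlt | hge
      · have hne : ¬ z.getD i 0 = z.getD (i + c) 0 := fun he => h ⟨hlt, he⟩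
        have hdrop : z.drop (i + c) = z.getD (i + c) 0 :: z.drop (i + c + 1) := by
          rw [List.getD_eq_getElem z 0 hlt, List.drop_eq_getElem_cons hlt]
        rw [hdrop]
        simp only [List.takeWhile]
        have hb : (z.getD (i + c) 0 == z.getD i 0) = false := by
          simp only [beq_eq_false_iff_ne, ne_eq]
          exact fun he => hne he.symm
        rw [hb]; simp
      · rw [List.drop_eq_nil_of_le (by omega)]; simp

-- B consumes one run: run_len and idx advance by the run's remaining length
theorem pvBGo_run (rest : List Int) (d : Int) (idx : Int) (res : List (Int × Int × Int))
    (rl st : Int) :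
    pvBGo rest idx res (some d) rl st =
      pvBGo (rest.dropWhile (fun x => x == d))
        (idx + ((rest.takeWhile (fun x => x == d)).length : Int)) res (some d)
        (rl + ((rest.takeWhile (fun x => x == d)).length : Int)) st := by
  induction rest generalizing idx rl with
  | nil => simp [List.takeWhile, List.dropWhile]
  | cons x r ih =>
    by_cases hx : x = d
    · subst hx
      have h1 : ((x :: r).takeWhile (fun y => y == x)) = x :: r.takeWhile (fun y => y == x) := by
        simp [List.takeWhile]
      have h2 : ((x :: r).dropWhile (fun y => y == x)) = r.dropWhile (fun y => y == x) := by
        simp [List.dropWhile]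
      have hstep : pvBGo (x :: r) idx res (some x) rl st =
          pvBGo r (idx + 1) res (some x) (rl + 1) st := by simp [pvBGo]
      rw [hstep, ih, h1, h2]
      simp only [List.length_cons]
      push_cast
      ring_nf
    · have hb : (x == d) = false := by simpa using hx
      have h1 : ((x :: r).takeWhile (fun y => y == d)) = [] := by simp [List.takeWhile, hb]
      have h2 : ((x :: r).dropWhile (fun y => y == d)) = x :: r := by simp [List.dropWhile, hb]
      rw [h1, h2]; simp

-- B at a run boundary: flush, then the remaining groups
theorem pvBGo_eq_pvG (z : List Int) (idx : Int) (res : List (Int × Int × Int))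
    (rd : Option Int) (rl st : Int)
    (hb : ∀ d rest, z = d :: rest → some d ≠ rd) :
    pvBGo z idx res rd rl st = pvFlush res rd rl st ++ pvG z idx := by
  induction hn : z.length using Nat.strong_induction_on generalizing z idx res rd rl st with
  | _ n ih =>
    match z with
    | [] => simp [pvBGo, pvG]
    | d :: rest =>
      have hne : ¬ (some d = rd) := hb d rest rfl
      rw [pvBGo, if_neg hne, pvBGo_run]
      have hlen : (rest.dropWhile (fun x => x == d)).length < n := by
        have := (List.dropWhile_sublist (l := rest) (p := fun x => x == d)).length_le
        simp at hn; omega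
      rw [ih _ hlen _ _ _ _ _ _ ?_ rfl]
      · simp only [pvG]
        set tw := (rest.takeWhile (fun x => x == d)).length with htw
        have hfl : ∀ X : List (Int × Int × Int), pvFlush X (some d) (1 + (tw : Int)) idx =
            X ++ (if 3 ≤ 1 + tw then [(d, ((1 + tw : Nat) : Int), idx)] else []) := by
          intro X
          unfold pvFlush
          by_cases h3 : 3 ≤ 1 + tw
          · rw [if_pos (by omega), if_pos h3]
            simp only [Option.getD]
            push_cast
            ring_nf
          · rw [if_neg (by omega), if_neg h3]
            simp
        have e : idx + 1 + (tw : Int) = idx + ((1 + tw : Nat) : Int) := by push_cast; ring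
        rw [hfl, List.append_assoc, e]
      · intro d' rest' he
        have := pv_dropWhile_head _ _ he
        simp at this
        simp [this]

-- A's outer loop from index i produces the groups of the suffix
theorem pvAOuter_eq_pvG (z : List Int) :
    ∀ fuel i acc, i ≤ z.length → z.length < i + fuel →
      pvAOuter z i acc fuel = acc ++ pvG (z.drop i) (i : Int) := by
  intro fuel
  induction fuel with
  | zero => intro i acc h1 h2; exact absurd h2 (by omega)
  | succ fuel ih =>
    intro i acc h1 h2
    rw [pvAOuter]
    by_cases h : i < z.length
    · rw [if_pos h]
      have hcnt : pvAInner z i 1 z.length =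
          1 + ((z.drop (i + 1)).takeWhile (fun x => x == z.getD i 0)).length :=
        pvAInner_eq z i z.length 1 (by omega)
      set t := ((z.drop (i + 1)).takeWhile (fun x => x == z.getD i 0)).length with ht
      have hdrop : z.drop i = z.getD i 0 :: z.drop (i + 1) := by
        rw [List.getD_eq_getElem z 0 h, List.drop_eq_getElem_cons h]
      have htle : t ≤ z.length - (i + 1) := by
        have h1 : ((z.drop (i + 1)).takeWhile (fun x => x == z.getD i 0)).length ≤
            (z.drop (i + 1)).length := (List.takeWhile_sublist _).length_le
        simpa using h1
      rw [ih (i + pvAInner z i 1 z.length) (if 3 ≤ pvAInner z i 1 z.length then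
            acc ++ [(z.getD i 0, (pvAInner z i 1 z.length : Int), (i : Int))] else acc)
          (by rw [hcnt]; omega) (by rw [hcnt]; omega)]
      rw [hdrop, pvG]
      have hdw : (z.drop (i + 1)).dropWhile (fun x => x == z.getD i 0) =
          z.drop (i + pvAInner z i 1 z.length) := by
        rw [pv_dropWhile_eq_drop, List.drop_drop, ← ht, hcnt]
        congr 1; omega
      rw [hdw]
      by_cases h3 : 3 ≤ pvAInner z i 1 z.length
      · have h3' : 3 ≤ 1 + t := by omega
        rw [if_pos h3, if_pos h3']
        simp only [List.append_assoc]
        congr 2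
        · congr 2
          rw [hcnt]
        · congr 1; rw [hcnt]; push_cast; ring
      · have h3' : ¬ 3 ≤ 1 + t := by omega
        rw [if_neg h3, if_neg h3']
        congr 1
        congr 1; rw [hcnt]; push_cast; ring
    · rw [if_neg h]
      rw [List.drop_eq_nil_of_le (by omega)]
      simp [pvG]

-- ===== VERDICT (by name: the statement is the Claim_ definition above) =====
theorem finde_wiederholungen_spec : Claim_equal_finde_wiederholungen := by
  intro text _
  show finde_wiederholungen text = finde_wiederholungen_alt text
  unfold finde_wiederholungen finde_wiederholungen_alt
  rw [pvAOuter_eq_pvG _ _ 0 [] (by omega) (by omega),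
      pvBGo_eq_pvG _ 0 [] none 0 0 (by intro d rest _; simp)]
  simp [pvFlush]
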